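-- pv_equiv track=rewrite | github.com/bat67/The-Python-Standard-Library-by-Example | pdb/pdb_no_jump.py | f
-- ===== SOURCE A (Python) =====
-- def f(n):
--     if n < 0:
--         raise ValueError('Invalid n: {}'.format(n))
--     result = []
--     j = 0
--     for i in range(n):
--         j = i * n + j
--         j += n
--         result.append(j)
--     return result
-- ===== SOURCE B (Python) =====
-- def f(n):
--     if n < 0:
--         raise ValueError('Invalid n: {}'.format(n))
--     return [n * (i + 1) * (i + 2) // 2 for i in range(n)]
-- ===== Notes on version B (the rewrite author's own statement) =====
-- stated objective: simpler
-- what changed: Replaced the stateful accumulator loop (j carried across iterations) by a direct comprehension with the closed form n*(i+1)*(i+2)//2 for each element.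
import Mathlib
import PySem

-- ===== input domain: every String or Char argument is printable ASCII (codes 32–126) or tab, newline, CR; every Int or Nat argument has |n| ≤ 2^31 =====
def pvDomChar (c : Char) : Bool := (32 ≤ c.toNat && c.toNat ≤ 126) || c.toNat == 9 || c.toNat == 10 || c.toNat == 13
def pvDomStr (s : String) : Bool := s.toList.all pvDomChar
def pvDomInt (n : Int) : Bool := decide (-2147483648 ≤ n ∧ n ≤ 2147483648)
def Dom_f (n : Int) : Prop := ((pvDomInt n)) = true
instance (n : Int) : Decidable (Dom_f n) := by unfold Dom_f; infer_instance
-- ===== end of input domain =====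

-- B replaces A's running accumulator with the closed form n*(i+1)*(i+2)//2 per element (simpler, no cross-iteration state).

-- ===== PORT A =====
def f (n : Int) : List Int :=
  ((PySem.List.pyRange 0 n 1).foldl
    (fun (st : List Int × Int) i =>
      let j := i * n + st.2
      let j := j + n
      (st.1 ++ [j], j))
    ([], 0)).1

-- ===== PORT B =====
def f_alt (n : Int) : List Int :=
  (PySem.List.pyRange 0 n 1).map (fun i => PySem.Int.floordiv (n * (i + 1) * (i + 2)) 2)

-- ===== PRECONDITION & SPEC =====
-- Pre_f excludes n < 0, where A raises ValueError.
def Pre_f (n : Int) : Prop := 0 ≤ n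
instance (n : Int) : Decidable (Pre_f n) := by unfold Pre_f; infer_instance
def pvWitness_f : Int := (3)
def Spec_f (n : Int) (out : List Int) : Prop := out = f_alt n
instance (n : Int) (out : List Int) : Decidable (Spec_f n out) := by unfold Spec_f; infer_instance

-- ===== CLAIM (what is proved, stated in full; the proofs are below) =====
def Claim_equal_f : Prop := ∀ (n : Int), Dom_f n → Pre_f n → Spec_f n (f n)

-- ===== LEMMAS AND PROOFS =====

theorem fd2 (k : Int) : PySem.Int.floordiv (2 * k) 2 = k := by
  rw [PySem.Int.floordiv_eq_ediv_of_pos (by norm_num)]; omega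

theorem fd_closed (n : Int) (m : Int) (r : Int) (hr : m * (m + 1) = r + r) :
    PySem.Int.floordiv (n * m * (m + 1)) 2 = n * r := by
  have h : n * m * (m + 1) = 2 * (n * r) := by
    have : n * (m * (m + 1)) = n * (r + r) := by rw [hr]
    linarith [this]
  rw [h, fd2]

theorem f_inv (n : Int) (m : Nat) :
    ((PySem.List.pyRange 0 (m : Int) 1).foldl
      (fun (st : List Int × Int) i =>
        let j := i * n + st.2
        let j := j + n
        (st.1 ++ [j], j))
      ([], 0))
    = ((PySem.List.pyRange 0 (m : Int) 1).map
         (fun i => PySem.Int.floordiv (n * (i + 1) * (i + 2)) 2),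
       PySem.Int.floordiv (n * (m : Int) * ((m : Int) + 1)) 2) := by
  induction m with
  | zero => simp [PySem.List.pyRange_one_eq_nil (by norm_num : (0:Int) ≤ 0)]
  | succ k ih =>
    have hsplit : PySem.List.pyRange 0 ((k:Int) + 1) 1
        = PySem.List.pyRange 0 (k:Int) 1 ++ [(k:Int)] :=
      PySem.List.pyRange_one_succ_right (by positivity)
    have hcast : ((k + 1 : Nat) : Int) = (k : Int) + 1 := by push_cast; ring
    rw [hcast, hsplit, List.foldl_append, ih, List.map_append]
    -- evenness witnesses
    obtain ⟨r, hr⟩ : Even ((k:Int) * ((k:Int) + 1)) := Int.even_mul_succ_self _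
    have hprev := fd_closed n (k:Int) r hr
    have hnext : PySem.Int.floordiv (n * ((k:Int) + 1) * (((k:Int) + 1) + 1)) 2
        = n * (r + (k:Int) + 1) := by
      apply fd_closed
      nlinarith [hr]
    have hnext' : PySem.Int.floordiv (n * ((k:Int) + 1) * ((k:Int) + 2)) 2
        = n * (r + (k:Int) + 1) := by
      have h2 : ((k:Int) + 2) = ((k:Int) + 1) + 1 := by ring
      rw [h2]; exact hnext
    have hj : (k:Int) * n + n * r + n = n * (r + (k:Int) + 1) := by ring
    simp only [List.foldl, List.map]
    rw [hprev, hnext, hnext', hj]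

-- ===== VERDICT (by name: the statement is the Claim_ definition above) =====
theorem f_spec : Claim_equal_f := by
  intro n _ hpre
  have hpre' : 0 ≤ n := hpre
  unfold Spec_f f f_alt
  obtain ⟨m, rfl⟩ : ∃ m : Nat, n = (m : Int) := ⟨n.toNat, by omega⟩
  rw [f_inv]
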